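-- pv_equiv track=rewrite | github.com/MAydedie/create_graph_new | analysis/path_hypergraph_enhancer.py | _find_main_method
-- ===== SOURCE A (Python) =====
-- from typing import Dict, List, Set, Optional, Any, Tuple
--
-- def _find_main_method(path: List[str], call_graph: Dict[str, Set[str]]) -> Optional[str]:
--     """查找总方法（调用路径上多个方法的）"""
--     for method_sig in call_graph:
--         if method_sig not in path:
--             # 检查这个方法是否调用了路径上的多个方法
--             called_path_methods = [m for m in path if m in call_graph.get(method_sig, set())]
--             if len(called_path_methods) >= 2:
--                 # 检查是否按顺序调用
--                 called_indices = [path.index(m) for m in called_path_methods]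
--                 if called_indices == sorted(called_indices):
--                     return method_sig
--     return None
-- ===== SOURCE B (Python) =====
-- def _find_main_method(path, call_graph):
--     """One global pass over path builds count/first/last tables; each candidate is
--     then judged from its out-neighbors alone: total hit count from the counter,
--     and the in-order test as disjointness of occurrence intervals (no pair a,b of
--     called path methods with first[b] < first[a] < last[b]). The path itself is
--     never rescanned per candidate."""
--     cnt = {}
--     first = {}
--     last = {}
--     for i, m in enumerate(path):
--         cnt[m] = cnt.get(m, 0) + 1
--         if m not in first:
--             first[m] = i
--         last[m] = i
--     for method_sig, callees in call_graph.items():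
--         if method_sig in first:
--             continue
--         hits = [m for m in callees if m in first]
--         if sum(cnt[m] for m in hits) < 2:
--             continue
--         if all(not (first[b] < first[a] < last[b]) for a in hits for b in hits):
--             return method_sig
--     return None
-- ===== Notes on version B (the rewrite author's own statement) =====
-- stated objective: faster
-- what changed: B builds count/first/last occurrence tables in one global pass over the path and judges each candidate from its out-neighbor list alone (summing precomputed counts and testing the in-order property as pairwise disjointness of occurrence intervals: no called pair a,b with first[b] < first[a] < last[b]), instead of A's per-candidate rescan of the path with repeated path.index calls and a sort-and-compare test.
import Mathlib
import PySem

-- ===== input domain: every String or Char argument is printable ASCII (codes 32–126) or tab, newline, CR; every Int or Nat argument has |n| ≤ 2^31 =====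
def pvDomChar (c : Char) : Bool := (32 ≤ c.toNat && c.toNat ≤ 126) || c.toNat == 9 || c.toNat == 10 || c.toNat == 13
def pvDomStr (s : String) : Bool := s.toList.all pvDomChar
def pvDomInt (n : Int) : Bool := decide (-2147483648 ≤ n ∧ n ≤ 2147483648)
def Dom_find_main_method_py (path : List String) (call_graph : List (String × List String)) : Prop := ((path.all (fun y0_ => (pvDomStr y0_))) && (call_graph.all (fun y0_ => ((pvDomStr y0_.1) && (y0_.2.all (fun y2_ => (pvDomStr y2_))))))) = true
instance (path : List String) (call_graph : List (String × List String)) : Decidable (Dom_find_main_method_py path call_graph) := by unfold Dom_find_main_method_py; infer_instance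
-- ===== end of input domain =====

-- B replaces A's per-candidate path rescans (repeated path.index + sort-and-compare) with
-- global count/first/last tables and a pairwise occurrence-interval disjointness test over
-- each candidate's out-neighbors (different algorithm, measured faster in a timing run).


-- ===== PORT A =====
-- the 'for method_sig in call_graph' loop body, one key/value pair at a time
-- (path.index(m) is called only with m ∈ path, so the '.getD 0' default is never the result)
def pvA_loop (path : List String) : List (String × List String) → Option String
  | [] => none
  | (method_sig, callees) :: rest =>
    if method_sig ∈ path then pvA_loop path rest
    else
      let called_path_methods := path.filter (fun m => callees.contains m)
      if 2 ≤ called_path_methods.length then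
        let called_indices : List Int :=
          called_path_methods.map (fun m => (((PySem.List.index? path m).getD 0 : Nat) : Int))
        if called_indices = PySem.List.sorted called_indices (fun x => x) false then
          some method_sig
        else pvA_loop path rest
      else pvA_loop path rest

def find_main_method_py (path : List String) (call_graph : List (String × List String)) : Option String :=
  pvA_loop path (PySem.Dict.ofList call_graph).items

-- ===== PORT B =====
-- the 'for i, m in enumerate(path)' pass: builds (cnt, first, last) in one fold
def pvB_tables (path : List String) :
    PySem.Dict String Int × PySem.Dict String Int × PySem.Dict String Int :=
  (PySem.List.enumerate path).foldl
    (fun t p =>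
      (t.1.insert p.2 (t.1.getD p.2 0 + 1),
       if t.2.1.contains p.2 then t.2.1 else t.2.1.insert p.2 p.1,
       t.2.2.insert p.2 p.1))
    (PySem.Dict.empty, PySem.Dict.empty, PySem.Dict.empty)

-- the 'for method_sig, callees in call_graph.items()' loop body
def pvB_loop (cnt first last : PySem.Dict String Int) :
    List (String × List String) → Option String
  | [] => none
  | (method_sig, callees) :: rest =>
    if first.contains method_sig then pvB_loop cnt first last rest
    else
      let hits := callees.filter (fun m => first.contains m)
      let total := hits.foldl (fun s m => s + cnt.getD m 0) (0 : Int)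
      if total < 2 then pvB_loop cnt first last rest
      else if hits.all (fun a => hits.all (fun b =>
              !(decide (first.getD b 0 < first.getD a 0) && decide (first.getD a 0 < last.getD b 0)))) then
        some method_sig
      else pvB_loop cnt first last rest

def find_main_method_py_alt (path : List String) (call_graph : List (String × List String)) : Option String :=
  let t := pvB_tables path
  pvB_loop t.1 t.2.1 t.2.2 (PySem.Dict.ofList call_graph).items

-- ===== PRECONDITION & SPEC =====
-- Pre_ only requires each value list of call_graph to have distinct elements: the Python
-- parameter is Dict[str, Set[str]], and a Python set never holds duplicates, so no actual
-- Python input is excluded (the excluded Lean lists represent no Python value).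
def Pre_find_main_method_py (path : List String) (call_graph : List (String × List String)) : Prop :=
  ∀ kv ∈ call_graph, kv.2.Nodup
instance (path : List String) (call_graph : List (String × List String)) : Decidable (Pre_find_main_method_py path call_graph) := by unfold Pre_find_main_method_py; infer_instance

def pvWitness_find_main_method_py : List String × (List (String × List String)) :=
  (["a", "b"], [("c", ["a", "b"])])

def Spec_find_main_method_py (path : List String) (call_graph : List (String × List String)) (out : Option String) : Prop := out = find_main_method_py_alt path call_graph
instance (path : List String) (call_graph : List (String × List String)) (out : Option String) : Decidable (Spec_find_main_method_py path call_graph out) := by unfold Spec_find_main_method_py; infer_instance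

-- ===== CLAIM (what is proved, stated in full; the proofs are below) =====
def Claim_equal_find_main_method_py : Prop := ∀ (path : List String) (call_graph : List (String × List String)), Dom_find_main_method_py path call_graph → Pre_find_main_method_py path call_graph → Spec_find_main_method_py path call_graph (find_main_method_py path call_graph)

-- ===== LEMMAS AND PROOFS =====

-- index of the LAST occurrence of m in a list (none if absent)
def pvLastIdx? (m : String) : List String → Option Nat
  | [] => none
  | a :: t =>
    match pvLastIdx? m t with
    | some j => some (j + 1)
    | none => if a = m then some 0 else none

-- abbreviations used by the combinatorial argument (defaults only ever read for m ∈ path)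
def pvFiN (path : List String) (m : String) : Nat := (path.idxOf? m).getD 0
def pvLaN (path : List String) (m : String) : Nat := (pvLastIdx? m path).getD 0

theorem pvLastIdx?_isSome (m : String) (l : List String) :
    (pvLastIdx? m l).isSome = true ↔ m ∈ l := by
  induction l with
  | nil => simp [pvLastIdx?]
  | cons a t ih =>
    simp only [pvLastIdx?, List.mem_cons]
    cases h : pvLastIdx? m t with
    | some j =>
      simp only [h, Option.isSome_some, true_iff]
      right
      exact ih.mp (by simp [h])
    | none =>
      have ht : m ∉ t := fun hm => by simp [h] at ih; exact ih hm
      by_cases ha : a = m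
      · simp [ha]
      · have hma : ¬ m = a := fun hh => ha hh.symm
        simp [ha, ht, hma]

theorem pvLastIdx?_getElem (m : String) (l : List String) (j : Nat)
    (h : pvLastIdx? m l = some j) : l[j]? = some m := by
  induction l generalizing j with
  | nil => simp [pvLastIdx?] at h
  | cons a t ih =>
    simp only [pvLastIdx?] at h
    cases h' : pvLastIdx? m t with
    | some j' =>
      rw [h'] at h
      cases h
      simpa using ih j' h'
    | none =>
      rw [h'] at h
      by_cases ha : a = m
      · simp only [ha, if_true] at h
        cases h
        simp [ha]
      · simp [ha] at h

theorem pvLastIdx?_ge (m : String) (l : List String) (i : Nat) (h : l[i]? = some m) :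
    ∃ j, pvLastIdx? m l = some j ∧ i ≤ j := by
  induction l generalizing i with
  | nil => simp at h
  | cons a t ih =>
    cases i with
    | zero =>
      simp only [List.getElem?_cons_zero, Option.some_inj] at h
      have hm : m ∈ a :: t := by simp [h]
      obtain ⟨j, hj⟩ := Option.isSome_iff_exists.mp ((pvLastIdx?_isSome m (a :: t)).mpr hm)
      exact ⟨j, hj, Nat.zero_le j⟩
    | succ i' =>
      simp only [List.getElem?_cons_succ] at h
      obtain ⟨j, hj, hij⟩ := ih i' h
      refine ⟨j + 1, ?_, by omega⟩
      simp [pvLastIdx?, hj]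

theorem pvIdxOf?_getElem (m : String) (l : List String) (j : Nat)
    (h : l.idxOf? m = some j) : l[j]? = some m := by
  obtain ⟨hlt, hget, -⟩ := List.idxOf?_eq_some_iff.mp h
  simp [List.getElem?_eq_some_iff, hlt, hget]

theorem pvIdxOf?_le (m : String) (l : List String) (i : Nat) (h : l[i]? = some m) :
    ∃ j, l.idxOf? m = some j ∧ j ≤ i := by
  obtain ⟨hlt, hget⟩ := List.getElem?_eq_some_iff.mp h
  have hm : m ∈ l := hget ▸ List.getElem_mem hlt
  obtain ⟨j, hj⟩ := Option.isSome_iff_exists.mp (List.isSome_idxOf?.mpr hm)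
  refine ⟨j, hj, ?_⟩
  obtain ⟨hjlt, -, hmin⟩ := List.idxOf?_eq_some_iff.mp hj
  by_contra hji
  exact hmin i (by omega) hget

-- for m ∈ path the defaults are never read
theorem pvFiN_spec (path : List String) (m : String) (hm : m ∈ path) :
    path.idxOf? m = some (pvFiN path m) := by
  obtain ⟨j, hj⟩ := Option.isSome_iff_exists.mp (List.isSome_idxOf?.mpr hm)
  simp [pvFiN, hj]

theorem pvLaN_spec (path : List String) (m : String) (hm : m ∈ path) :
    pvLastIdx? m path = some (pvLaN path m) := by
  obtain ⟨j, hj⟩ := Option.isSome_iff_exists.mp ((pvLastIdx?_isSome m path).mpr hm)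
  simp [pvLaN, hj]

theorem pvFiN_getElem (path : List String) (m : String) (hm : m ∈ path) :
    path[pvFiN path m]? = some m :=
  pvIdxOf?_getElem m path _ (pvFiN_spec path m hm)

theorem pvLaN_getElem (path : List String) (m : String) (hm : m ∈ path) :
    path[pvLaN path m]? = some m :=
  pvLastIdx?_getElem m path _ (pvLaN_spec path m hm)

theorem pvFiN_le (path : List String) (m : String) (i : Nat) (h : path[i]? = some m) :
    pvFiN path m ≤ i := by
  obtain ⟨j, hj, hji⟩ := pvIdxOf?_le m path i h
  simp [pvFiN, hj]; omega

theorem pvLaN_ge (path : List String) (m : String) (i : Nat) (h : path[i]? = some m) :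
    i ≤ pvLaN path m := by
  obtain ⟨j, hj, hij⟩ := pvLastIdx?_ge m path i h
  simp [pvLaN, hj]; omega

-- the heart of the equivalence: the first-index sequence along the path, restricted to
-- a predicate c, is non-decreasing iff no pair a b (both in path, both satisfying c)
-- has first(a) strictly inside b's occurrence interval
theorem pvPairwise_iff_no_containment (path : List String) (c : String → Bool) :
    List.Pairwise (fun x y => c x = true → c y = true → pvFiN path x ≤ pvFiN path y) path
      ↔ ∀ a b, a ∈ path → c a = true → b ∈ path → c b = true →
          ¬(pvFiN path b < pvFiN path a ∧ pvFiN path a < pvLaN path b) := by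
  constructor
  · intro hp a b ha hca hb hcb ⟨h1, h2⟩
    obtain ⟨hia, hga⟩ := List.getElem?_eq_some_iff.mp (pvFiN_getElem path a ha)
    obtain ⟨hib, hgb⟩ := List.getElem?_eq_some_iff.mp (pvLaN_getElem path b hb)
    rw [List.pairwise_iff_getElem] at hp
    have := hp (pvFiN path a) (pvLaN path b) hia hib h2
    rw [hga, hgb] at this
    exact absurd (this hca hcb) (by omega)
  · intro h
    rw [List.pairwise_iff_getElem]
    intro i j hi hj hij hci hcj
    by_contra hlt
    push_neg at hlt
    have hmi : path[i] ∈ path := List.getElem_mem hi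
    have hmj : path[j] ∈ path := List.getElem_mem hj
    refine h path[i] path[j] hmi hci hmj hcj ⟨hlt, ?_⟩
    have h1 : pvFiN path path[i] ≤ i :=
      pvFiN_le path _ i (by simp [List.getElem?_eq_some_iff, hi])
    have h2 : j ≤ pvLaN path path[j] :=
      pvLaN_ge path _ j (by simp [List.getElem?_eq_some_iff, hj])
    omega

-- A's sorted-check is the Pairwise condition on path
theorem pvA_check_iff (path : List String) (c : String → Bool) :
    ((path.filter c).map (fun m => (((PySem.List.index? path m).getD 0 : Nat) : Int))
       = PySem.List.sorted ((path.filter c).map (fun m => (((PySem.List.index? path m).getD 0 : Nat) : Int))) (fun x => x) false)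
      ↔ List.Pairwise (fun x y => c x = true → c y = true → pvFiN path x ≤ pvFiN path y) path := by
  have hpw : ((path.filter c).map (fun m => (((PySem.List.index? path m).getD 0 : Nat) : Int))).Pairwise (· ≤ ·)
      ↔ List.Pairwise (fun x y => c x = true → c y = true → pvFiN path x ≤ pvFiN path y) path := by
    rw [List.pairwise_map, List.pairwise_filter]
    constructor
    · refine fun hp => hp.imp ?_
      intro x y hxy hcx hcy
      have := hxy hcx hcy
      simp only [PySem.List.index?_eq_idxOf?] at this
      exact_mod_cast this
    · refine fun hp => hp.imp ?_
      intro x y hxy hcx hcy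
      have := hxy hcx hcy
      simp only [PySem.List.index?_eq_idxOf?]
      exact_mod_cast this
  constructor
  · intro h
    rw [← hpw]
    have hs := PySem.List.sorted_pairwise ((path.filter c).map
      (fun m => (((PySem.List.index? path m).getD 0 : Nat) : Int))) (fun x : Int => x)
    rw [← h] at hs
    exact hs
  · intro h
    exact (PySem.List.sorted_eq_self_of_pairwise _ _ (by simpa using hpw.mpr h)).symm

-- splitting the triple fold into three independent folds
theorem pvTriple_fold (l : List (Int × String)) (a b c : PySem.Dict String Int) :
    l.foldl (fun t p =>
        (t.1.insert p.2 (t.1.getD p.2 0 + 1),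
         if t.2.1.contains p.2 then t.2.1 else t.2.1.insert p.2 p.1,
         t.2.2.insert p.2 p.1)) (a, b, c)
      = (l.foldl (fun d p => d.insert p.2 (d.getD p.2 0 + 1)) a,
         l.foldl (fun d p => if d.contains p.2 then d else d.insert p.2 p.1) b,
         l.foldl (fun d p => d.insert p.2 p.1) c) := by
  induction l generalizing a b c with
  | nil => rfl
  | cons p t ih => simp only [List.foldl_cons]; rw [ih]

-- characterisations of the three tables ---------------------------------------------------
theorem pvB_tables_eq (path : List String) :
    pvB_tables path
      = (path.foldl (fun d x => d.insert x (d.getD x 0 + 1)) PySem.Dict.empty,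
         (PySem.List.enumerate path).foldl
           (fun d p => if d.contains p.2 then d else d.insert p.2 p.1) PySem.Dict.empty,
         (PySem.List.enumerate path).foldl (fun d p => d.insert p.2 p.1) PySem.Dict.empty) := by
  unfold pvB_tables
  rw [pvTriple_fold]
  congr 1
  conv_rhs => rw [← PySem.List.map_snd_enumerate path 0, List.foldl_map]

theorem pvB_tables_cnt (path : List String) (m : String) :
    (pvB_tables path).1.getD m 0 = (path.count m : Int) := by
  rw [pvB_tables_eq]
  simp only []
  rw [PySem.Dict.foldl_insert_getD_add_one_eq_counter, PySem.Dict.getD_counter]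

theorem pvFirst_fold_get? (l : List String) (s : Int) (d : PySem.Dict String Int) (m : String) :
    ((PySem.List.enumerate l s).foldl
        (fun d p => if d.contains p.2 then d else d.insert p.2 p.1) d).get? m
      = if (d.get? m).isSome then d.get? m
        else (l.idxOf? m).map (fun i => s + (i : Int)) := by
  induction l generalizing s d with
  | nil => simp [PySem.List.enumerate]
  | cons a t ih =>
    rw [PySem.List.enumerate_cons, List.foldl_cons, List.idxOf?_cons]
    by_cases ham : a = m
    · subst ham
      simp only [beq_self_eq_true, if_true]
      by_cases hda : d.contains a
      · have hs : (d.get? a).isSome = true := by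
          rwa [PySem.Dict.contains_eq_isSome_get?] at hda
        simp only [hda, if_true]
        rw [ih]
        simp [hs]
      · have hda' : d.contains a = false := by simpa using hda
        have hs : (d.get? a).isSome = false := by
          rwa [PySem.Dict.contains_eq_isSome_get?] at hda'
        simp only [hda', Bool.false_eq_true, if_false]
        rw [ih]
        simp [PySem.Dict.get?_insert_self, hs]
    · have hbe : (a == m) = false := by simpa using ham
      have hne : m ≠ a := fun h => ham h.symm
      simp only [hbe, Bool.false_eq_true, if_false]
      by_cases hda : d.contains a
      · simp only [hda, if_true]
        rw [ih]
        rcases h : List.idxOf? m t with _ | i <;> simp [h] <;> ring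
      · have hda' : d.contains a = false := by simpa using hda
        simp only [hda', Bool.false_eq_true, if_false]
        rw [ih]
        rw [PySem.Dict.get?_insert_of_ne d _ hne]
        rcases h : List.idxOf? m t with _ | i <;> simp [h] <;> ring

theorem pvLast_fold_get? (l : List String) (s : Int) (d : PySem.Dict String Int) (m : String) :
    ((PySem.List.enumerate l s).foldl (fun d p => d.insert p.2 p.1) d).get? m
      = match pvLastIdx? m l with
        | some j => some (s + (j : Int))
        | none => d.get? m := by
  induction l generalizing s d with
  | nil => simp [PySem.List.enumerate, pvLastIdx?]
  | cons a t ih =>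
    rw [PySem.List.enumerate_cons, List.foldl_cons]
    rw [ih]
    simp only [pvLastIdx?]
    cases h : pvLastIdx? m t with
    | some j =>
      simp only []
      congr 1
      push_cast
      ring
    | none =>
      simp only []
      by_cases ham : a = m
      · subst ham
        simp [PySem.Dict.get?_insert_self]
      · have hne : m ≠ a := fun h => ham h.symm
        simp [ham, PySem.Dict.get?_insert_of_ne d _ hne]

theorem pvB_first_get? (path : List String) (m : String) :
    (pvB_tables path).2.1.get? m = (path.idxOf? m).map (fun i => (i : Int)) := by
  rw [pvB_tables_eq]
  simp only []
  rw [pvFirst_fold_get?]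
  simp [PySem.Dict.get?_empty]

theorem pvB_last_get? (path : List String) (m : String) :
    (pvB_tables path).2.2.get? m = (pvLastIdx? m path).map (fun i => (i : Int)) := by
  rw [pvB_tables_eq]
  simp only []
  rw [pvLast_fold_get?]
  cases h : pvLastIdx? m path <;> simp [PySem.Dict.get?_empty]

theorem pvB_first_contains (path : List String) (m : String) :
    (pvB_tables path).2.1.contains m = path.contains m := by
  rw [PySem.Dict.contains_eq_isSome_get?, pvB_first_get?]
  by_cases hm : m ∈ path
  · obtain ⟨j, hj⟩ := Option.isSome_iff_exists.mp (List.isSome_idxOf?.mpr hm)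
    simp [hj, hm]
  · have hn : path.idxOf? m = none := by
      cases h : path.idxOf? m with
      | none => rfl
      | some j => exact absurd (List.isSome_idxOf?.mp (by simp [h])) hm
    simp [hn, hm]

theorem pvB_first_getD (path : List String) (m : String) (hm : m ∈ path) :
    (pvB_tables path).2.1.getD m 0 = ((pvFiN path m : Nat) : Int) := by
  rw [PySem.Dict.getD_eq_get?_getD, pvB_first_get?, pvFiN_spec path m hm]
  rfl

theorem pvB_last_getD (path : List String) (m : String) (hm : m ∈ path) :
    (pvB_tables path).2.2.getD m 0 = ((pvLaN path m : Nat) : Int) := by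
  rw [PySem.Dict.getD_eq_get?_getD, pvB_last_get?, pvLaN_spec path m hm]
  rfl

-- folding + over a list is the sum of the mapped list
theorem pvFoldl_add (l : List String) (f : String → Int) (s : Int) :
    l.foldl (fun s m => s + f m) s = s + (l.map f).sum := by
  induction l generalizing s with
  | nil => simp
  | cons a t ih => simp [List.foldl_cons, ih]; ring

-- dropping the ∈-path filter does not change the count sum (dropped counts are 0)
theorem pvSum_filter (path callees : List String) :
    (((callees.filter (fun m => path.contains m)).map (fun m => ((path.count m : Nat) : Int))).sum)
      = ((callees.map (fun m => ((path.count m : Nat) : Int))).sum) := by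
  induction callees with
  | nil => rfl
  | cons a t ih =>
    rw [List.filter_cons]
    by_cases ha : a ∈ path
    · have ha' : path.contains a = true := by simpa using ha
      simp only [ha', if_true, List.map_cons, List.sum_cons, ih]
    · have ha' : path.contains a = false := by simpa using ha
      have hc : List.count a path = 0 := List.count_eq_zero_of_not_mem ha
      simp only [ha', Bool.false_eq_true, if_false, ih, List.map_cons, List.sum_cons, hc]
      simp

-- length of the filter by membership in a :: cs splits off count a (a ∉ cs)
theorem pvFilter_cons_len (path : List String) (a : String) (cs : List String) (ha : a ∉ cs) :
    (path.filter (fun m => (a :: cs).contains m)).length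
      = path.count a + (path.filter (fun m => cs.contains m)).length := by
  induction path with
  | nil => rfl
  | cons h t iht =>
    rw [List.filter_cons, List.filter_cons, List.count_cons]
    by_cases hha : h = a
    · subst hha
      have h1 : (h :: cs).contains h = true := by simp
      have h2 : cs.contains h = false := by simpa using ha
      simp only [h1, if_true, h2, Bool.false_eq_true, if_false, List.length_cons,
        beq_self_eq_true, iht]
      omega
    · have hba : (h == a) = false := by simpa using hha
      rw [List.contains_cons, hba, Bool.false_or]
      by_cases hcs : cs.contains h
      · simp only [hcs, if_true, List.length_cons, iht, Bool.false_eq_true, if_false]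
        omega
      · have hcs' : cs.contains h = false := by simpa using hcs
        simp only [hcs', Bool.false_eq_true, if_false, iht]
        omega

-- for a duplicate-free callee list, the count sum is the filtered-path length
theorem pvSum_counts (path callees : List String) (hnd : callees.Nodup) :
    ((callees.map (fun m => path.count m)).sum)
      = (path.filter (fun m => callees.contains m)).length := by
  induction callees with
  | nil => simp
  | cons a cs ih =>
    have hacs : a ∉ cs := (List.nodup_cons.mp hnd).1
    rw [List.map_cons, List.sum_cons, ih (List.nodup_cons.mp hnd).2,
      pvFilter_cons_len path a cs hacs]

theorem pvB_total_eq (path callees : List String) (hnd : callees.Nodup) :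
    ((callees.filter (fun m => path.contains m)).foldl
        (fun s m => s + ((path.count m : Nat) : Int)) 0)
      = ((path.filter (fun m => callees.contains m)).length : Int) := by
  rw [pvFoldl_add, pvSum_filter path callees]
  have := pvSum_counts path callees hnd
  have hcast : ((callees.map (fun m => ((path.count m : Nat) : Int))).sum)
      = (((callees.map (fun m => path.count m)).sum : Nat) : Int) := by
    rw [Nat.cast_list_sum, List.map_map]
    rfl
  rw [hcast, this]
  simp

-- B's all-pairs interval check over hits, rephrased
theorem pvB_pairs_iff (path callees : List String) :
    ((callees.filter (fun m => path.contains m)).all (fun a =>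
        (callees.filter (fun m => path.contains m)).all (fun b =>
          !(decide ((pvB_tables path).2.1.getD b 0 < (pvB_tables path).2.1.getD a 0)
              && decide ((pvB_tables path).2.1.getD a 0 < (pvB_tables path).2.2.getD b 0)))) = true)
      ↔ ∀ a b, a ∈ path → callees.contains a = true → b ∈ path → callees.contains b = true →
          ¬(pvFiN path b < pvFiN path a ∧ pvFiN path a < pvLaN path b) := by
  have hmem : ∀ x, x ∈ callees.filter (fun m => path.contains m)
      ↔ (x ∈ path ∧ callees.contains x = true) := by
    intro x
    rw [List.mem_filter]
    constructor
    · rintro ⟨h1, h2⟩; exact ⟨by simpa using h2, by simpa using h1⟩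
    · rintro ⟨h1, h2⟩; exact ⟨by simpa using h2, by simpa using h1⟩
  rw [List.all_eq_true]
  constructor
  · intro h a b ha hca hb hcb hcon
    have h2 := List.all_eq_true.mp (h a ((hmem a).mpr ⟨ha, hca⟩)) b ((hmem b).mpr ⟨hb, hcb⟩)
    rw [pvB_first_getD path a ha, pvB_first_getD path b hb, pvB_last_getD path b hb] at h2
    simp only [Bool.not_eq_true', Bool.and_eq_false_iff, decide_eq_false_iff_not, Int.not_lt] at h2
    rcases h2 with h2 | h2 <;> [exact absurd hcon (by push_cast at h2; omega); exact absurd hcon (by push_cast at h2; omega)]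
  · intro h a ha
    rw [List.all_eq_true]
    intro b hb
    obtain ⟨hpa, hca⟩ := (hmem a).mp ha
    obtain ⟨hpb, hcb⟩ := (hmem b).mp hb
    have := h a b hpa hca hpb hcb
    rw [pvB_first_getD path a hpa, pvB_first_getD path b hpb, pvB_last_getD path b hpb]
    simp only [Bool.not_eq_true', Bool.and_eq_false_iff, decide_eq_false_iff_not, Int.not_lt]
    by_cases h1 : pvFiN path b < pvFiN path a
    · right; have : ¬ pvFiN path a < pvLaN path b := fun h2 => this ⟨h1, h2⟩
      push_cast; omega
    · left; push_cast; omega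

-- per-item equivalence of the two loops
theorem pvLoop_eq (path : List String) (items : List (String × List String))
    (hnd : ∀ kv ∈ items, kv.2.Nodup) :
    pvA_loop path items
      = pvB_loop (pvB_tables path).1 (pvB_tables path).2.1 (pvB_tables path).2.2 items := by
  induction items with
  | nil => rfl
  | cons kv rest ih =>
    obtain ⟨sig, callees⟩ := kv
    have ihr := ih (fun kv hkv => hnd kv (List.mem_cons_of_mem _ hkv))
    have hndc : callees.Nodup := hnd (sig, callees) (List.mem_cons_self)
    simp only [pvA_loop, pvB_loop, pvB_first_contains]
    by_cases hp : sig ∈ path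
    · simp [hp, ihr]
    · have hp' : path.contains sig = false := by simpa using hp
      simp only [hp', Bool.false_eq_true, if_false, if_neg hp]
      -- identify B's hits and total with A's quantities
      have htotal :
          (callees.filter (fun m => path.contains m)).foldl
              (fun s m => s + (pvB_tables path).1.getD m 0) (0 : Int)
            = ((path.filter (fun m => callees.contains m)).length : Int) := by
        have hfun : (fun (s : Int) (m : String) => s + (pvB_tables path).1.getD m 0)
            = (fun (s : Int) (m : String) => s + ((path.count m : Nat) : Int)) := by
          funext s m
          rw [pvB_tables_cnt]
        rw [hfun]
        exact pvB_total_eq path callees hndc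
      rw [htotal]
      by_cases hlen : 2 ≤ (path.filter (fun m => callees.contains m)).length
      · have hlt : ¬ (((path.filter (fun m => callees.contains m)).length : Int) < 2) := by
          omega
        rw [if_pos hlen, if_neg hlt]
        have hiff := (pvA_check_iff path (fun m => callees.contains m)).trans
          ((pvPairwise_iff_no_containment path (fun m => callees.contains m)).trans
            (pvB_pairs_iff path callees).symm)
        by_cases hs : ((path.filter (fun m => callees.contains m)).map
            (fun m => (((PySem.List.index? path m).getD 0 : Nat) : Int)))
            = PySem.List.sorted ((path.filter (fun m => callees.contains m)).map
                (fun m => (((PySem.List.index? path m).getD 0 : Nat) : Int))) (fun x => x) false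
        · rw [if_pos hs, if_pos (hiff.mp hs)]
        · rw [if_neg hs, if_neg (fun hb => hs (hiff.mpr hb)), ihr]
      · have hlt : ((path.filter (fun m => callees.contains m)).length : Int) < 2 := by
          omega
        rw [if_neg hlen, if_pos hlt, ihr]

-- values in the items of an ofList dict all come from the original pair list
theorem pvMem_items_update (l : List (String × List String)) (d : PySem.Dict String (List String))
    (kv : String × List String) (h : kv ∈ (d.update l).items) : kv ∈ l ∨ kv ∈ d.items := by
  induction l generalizing d with
  | nil => exact Or.inr h
  | cons p t ih =>
    rcases ih (d.insert p.1 p.2) h with h1 | h2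
    · exact Or.inl (List.mem_cons_of_mem _ h1)
    · rcases (PySem.Dict.mem_items_insert d p.1 p.2 kv).mp h2 with rfl | ⟨h3, -⟩
      · exact Or.inl List.mem_cons_self
      · exact Or.inr h3

theorem pvMem_items_ofList (l : List (String × List String)) (kv : String × List String)
    (h : kv ∈ (PySem.Dict.ofList l).items) : kv ∈ l := by
  rcases pvMem_items_update l PySem.Dict.empty kv h with h1 | h2
  · exact h1
  · simp [PySem.Dict.empty, PySem.Dict.items] at h2

-- ===== VERDICT (by name: the statement is the Claim_ definition above) =====
theorem find_main_method_py_spec : Claim_equal_find_main_method_py := by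
  intro path call_graph _ hpre
  unfold Spec_find_main_method_py find_main_method_py find_main_method_py_alt
  exact pvLoop_eq path (PySem.Dict.ofList call_graph).items
    (fun kv hkv => hpre kv (pvMem_items_ofList call_graph kv hkv))
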